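-- pv_equiv track=rewrite | github.com/AstroLis/test-maker | opt_form.py | DStrFrom1fN
-- ===== SOURCE A (Python) =====
-- def NtoList(iPerf):
--  ff=[]
--  i=0
--  while (iPerf>0):
--   if(iPerf%2):
--    ff.append(i)
--   i=i+1
--   iPerf=iPerf>>1
--  return ff
--
-- def NtoListB(iPerf,l):
--  ff=[]
--  for i in range(0,l):
--   ff.append(iPerf%2)
--   iPerf=iPerf>>1
--  return ff
--
-- def DStrIMask(i,m):
--  lett=['A','B','C','D','E','F','G']
--  strf=''
--  n=3
--  f=i
--  first=1
--  for ii in range(0,3):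
--   bit=f%2
--   f=f>>1
--   mbit=m%2
--   m=m>>1
--   if(not mbit):
--    if not first:
--     strf+=' \\cdot '
--    else:
--     first=0
--    if(bit):
--     strf+=lett[ii]
--    else:
--     strf+='\\overline{'+lett[ii]+'}'
--  return strf
--
-- def DStrFrom1fN(n):
--  ff=NtoList(n)
--  if(len(ff)==0):
--   return "\\emptyset"
--  maskl=[0,0,0]
--  mm=NtoListB(ff[0],3)
--  for i in range(1,len(ff)):
--   k=NtoListB(ff[i],3)
--   for j in range(0,3):
--    if not mm[j]==k[j]:
--     maskl[j]=1
--  mask=maskl[0]+maskl[1]*2+maskl[2]*4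
--  #strf="$"
--  strf=DStrIMask(ff[0],mask)
--  #strf+="$"
--  return strf
-- ===== SOURCE B (Python) =====
-- def DStrFrom1fN(n):
--     # one pass over the bits of n: remember the first set-bit position p0 and
--     # OR together (p ^ p0) for every set-bit position p; diff&7 marks the
--     # varying low-3 bits, the constant ones are rendered and joined.
--     p0 = -1
--     diff = 0
--     pos = 0
--     m = n
--     while m > 0:
--         if m % 2:
--             if p0 < 0:
--                 p0 = pos
--             diff |= pos ^ p0
--         pos += 1
--         m >>= 1
--     if p0 < 0:
--         return "\\emptyset"
--     lett = ['A', 'B', 'C']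
--     parts = []
--     v = diff
--     p = p0
--     for ii in range(3):
--         if not v % 2:
--             parts.append(lett[ii] if p % 2 else '\\overline{' + lett[ii] + '}')
--         v >>= 1
--         p >>= 1
--     return ' \\cdot '.join(parts)
-- ===== Notes on version B (the rewrite author's own statement) =====
-- stated objective: simpler
-- what changed: B replaces A's construction of per-position bit lists (NtoListB) compared element-wise in a nested loop, and the first-flag string concatenation of DStrIMask, by a single while-loop bit scan recording the first set-bit position and an OR of XOR-differences of set-bit positions, then rendering the constant bits and joining them with the separator.
import Mathlib
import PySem

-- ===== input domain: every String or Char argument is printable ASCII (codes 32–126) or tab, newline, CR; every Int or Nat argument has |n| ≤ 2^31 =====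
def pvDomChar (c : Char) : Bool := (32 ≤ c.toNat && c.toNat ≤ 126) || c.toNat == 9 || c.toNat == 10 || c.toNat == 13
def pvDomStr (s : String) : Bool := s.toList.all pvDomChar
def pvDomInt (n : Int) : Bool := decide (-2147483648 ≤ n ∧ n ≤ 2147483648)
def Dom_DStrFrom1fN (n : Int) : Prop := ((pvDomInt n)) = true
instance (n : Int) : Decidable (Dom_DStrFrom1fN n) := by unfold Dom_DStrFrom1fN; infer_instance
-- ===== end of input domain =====

-- B replaces A's per-position bit-list construction and comparison by a single bit scan
-- accumulating the first set position and an OR of XOR-differences (objective: simpler).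

-- ===== PORT A =====
def pvNtoListGo (iPerf i : Int) : List Int :=
  if 0 < iPerf then
    (if PySem.Int.mod iPerf 2 ≠ 0 then [i] else []) ++ pvNtoListGo (iPerf >>> (1 : Nat)) (i + 1)
  else []
termination_by iPerf.toNat
decreasing_by
  have h2 := Int.shiftRight_eq_div_pow iPerf 1
  simp at h2; omega

def NtoList (iPerf : Int) : List Int := pvNtoListGo iPerf 0

def NtoListB (iPerf l : Int) : List Int :=
  ((PySem.List.pyRange 0 l 1).foldl
    (fun (s : List Int × Int) (_i : Int) => (s.1 ++ [PySem.Int.mod s.2 2], s.2 >>> (1 : Nat)))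
    ([], iPerf)).1

def pvLett : List (List Char) := [['A'], ['B'], ['C'], ['D'], ['E'], ['F'], ['G']]

def DStrIMask (i m : Int) : String :=
  let st := (PySem.List.pyRange 0 3 1).foldl
    (fun (s : List Char × Int × Int × Int) (ii : Int) =>
      let bit := PySem.Int.mod s.2.1 2
      let f := s.2.1 >>> (1 : Nat)
      let mbit := PySem.Int.mod s.2.2.1 2
      let m := s.2.2.1 >>> (1 : Nat)
      if mbit = 0 then
        let sf := if s.2.2.2 = 0 then (s.1 ++ " \\cdot ".toList, s.2.2.2) else (s.1, (0 : Int))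
        let strf := sf.1 ++ (if bit ≠ 0 then (PySem.List.pyGet? pvLett ii).getD []
                             else "\\overline{".toList ++ (PySem.List.pyGet? pvLett ii).getD [] ++ "}".toList)
        (strf, f, m, sf.2)
      else (s.1, f, m, s.2.2.2))
    (([] : List Char), i, m, (1 : Int))
  String.ofList st.1

def DStrFrom1fN (n : Int) : String :=
  let ff := NtoList n
  if ff.length = 0 then "\\emptyset"
  else
    let mm := NtoListB ((PySem.List.pyGet? ff 0).getD 0) 3
    let maskl := (PySem.List.pyRange 1 (ff.length : Int) 1).foldl
      (fun (maskl : List Int) (i : Int) =>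
        let k := NtoListB ((PySem.List.pyGet? ff i).getD 0) 3
        (PySem.List.pyRange 0 3 1).foldl
          (fun (maskl : List Int) (j : Int) =>
            if ¬ ((PySem.List.pyGet? mm j).getD 0 = (PySem.List.pyGet? k j).getD 0)
            then PySem.List.pySetD maskl j 1 else maskl)
          maskl)
      ([0, 0, 0] : List Int)
    let mask := (PySem.List.pyGet? maskl 0).getD 0 + (PySem.List.pyGet? maskl 1).getD 0 * 2
                  + (PySem.List.pyGet? maskl 2).getD 0 * 4
    DStrIMask ((PySem.List.pyGet? ff 0).getD 0) mask

-- ===== PORT B =====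
def pvScan (m pos p0 diff : Int) : Int × Int :=
  if 0 < m then
    if PySem.Int.mod m 2 ≠ 0 then
      let p0' := if p0 < 0 then pos else p0
      pvScan (m >>> (1 : Nat)) (pos + 1) p0' (PySem.Int.bor diff (PySem.Int.bxor pos p0'))
    else pvScan (m >>> (1 : Nat)) (pos + 1) p0 diff
  else (p0, diff)
termination_by m.toNat
decreasing_by
  all_goals
    have h2 := Int.shiftRight_eq_div_pow m 1
    simp at h2; omega

def pvLettB : List (List Char) := [['A'], ['B'], ['C']]

def DStrFrom1fN_alt (n : Int) : String :=
  let sc := pvScan n 0 (-1) 0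
  if sc.1 < 0 then "\\emptyset"
  else
    let st := (PySem.List.pyRange 0 3 1).foldl
      (fun (s : List (List Char) × Int × Int) (ii : Int) =>
        let parts := if PySem.Int.mod s.2.1 2 = 0 then
            s.1 ++ [if PySem.Int.mod s.2.2 2 ≠ 0 then (PySem.List.pyGet? pvLettB ii).getD []
                    else "\\overline{".toList ++ (PySem.List.pyGet? pvLettB ii).getD [] ++ "}".toList]
          else s.1
        (parts, s.2.1 >>> (1 : Nat), s.2.2 >>> (1 : Nat)))
      (([] : List (List Char)), sc.2, sc.1)
    String.ofList (PySem.Chars.join " \\cdot ".toList st.1)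

-- ===== PRECONDITION & SPEC =====
def Spec_DStrFrom1fN (n : Int) (out : String) : Prop := out = DStrFrom1fN_alt n
instance (n : Int) (out : String) : Decidable (Spec_DStrFrom1fN n out) := by unfold Spec_DStrFrom1fN; infer_instance

-- ===== CLAIM (what is proved, stated in full; the proofs are below) =====
def Claim_equal_DStrFrom1fN : Prop := ∀ (n : Int), Dom_DStrFrom1fN n → Spec_DStrFrom1fN n (DStrFrom1fN n)

-- ===== LEMMAS AND PROOFS =====

lemma pvMod2 (m : Int) (_h : 0 < m) : PySem.Int.mod m 2 = m % 2 :=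
  PySem.Int.mod_eq_emod_of_pos (by norm_num)

-- B's while-loop is a left fold of this step over A's list of set-bit positions.
def pvStep (s : Int × Int) (x : Int) : Int × Int :=
  let p0 := if s.1 < 0 then x else s.1
  (p0, PySem.Int.bor s.2 (PySem.Int.bxor x p0))

lemma pvScan_eq_foldl (m pos p0 diff : Int) :
    pvScan m pos p0 diff = (pvNtoListGo m pos).foldl pvStep (p0, diff) := by
  induction m, pos, p0, diff using pvScan.induct with
  | case1 m pos p0 diff hm hodd p0' ih =>
    rw [pvScan, pvNtoListGo]
    have h : m % 2 = 1 := by have := pvMod2 m hm; omega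
    simp only [] at ih
    simp [hm, h, pvStep]
    exact ih
  | case2 m pos p0 diff hm hodd ih =>
    rw [pvScan, pvNtoListGo]
    have h : ¬ m % 2 = 1 := by have := pvMod2 m hm; simp at hodd; omega
    simp [hm, h, ih]
  | case3 m pos p0 diff hm =>
    rw [pvScan, pvNtoListGo]
    simp [hm]

lemma pvNtoListGo_nonneg (m pos : Int) : ∀ x ∈ pvNtoListGo m pos, pos ≤ x := by
  induction m, pos using pvNtoListGo.induct with
  | case1 m pos hm ih =>
    intro x hx
    rw [pvNtoListGo] at hx
    simp [hm] at hx
    rcases hx with hx | hx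
    · rcases hx with ⟨-, hx⟩; omega
    · have := ih x hx; omega
  | case2 m pos hm =>
    intro x hx
    rw [pvNtoListGo] at hx; simp [hm] at hx

lemma pvNtoListGo_ne_nil (m pos : Int) (hm : 0 < m) : pvNtoListGo m pos ≠ [] := by
  induction m, pos using pvNtoListGo.induct with
  | case1 m pos hm' ih =>
    rw [pvNtoListGo]
    by_cases ho : m % 2 = 1
    · simp [hm', ho]
    · have h2 := Int.shiftRight_eq_div_pow m 1
      simp at h2
      simp [hm', ho]
      intro hdvd
      exact ih (by omega) hdvd
  | case2 m pos hm' => omega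

lemma pvNtoListGo_nil (m pos : Int) (hm : ¬ 0 < m) : pvNtoListGo m pos = [] := by
  rw [pvNtoListGo]; simp [hm]

lemma pvScan_nil (n : Int) (hn : ¬ 0 < n) : pvScan n 0 (-1) 0 = (-1, 0) := by
  rw [pvScan]; simp [hn]

-- components of the maskl state: the three low bits of a Nat, as 0/1 integers
def pvBits3 (d : Nat) : List Int := [(↑(d % 2) : Int), ↑(d / 2 % 2), ↑(d / 4 % 2)]

lemma pvNtoListB_natCast (a : Nat) :
    NtoListB (↑a) 3 = [(↑(a % 2) : Int), ↑(a / 2 % 2), ↑(a / 4 % 2)] := by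
  have hr : PySem.List.pyRange 0 3 1 = [0, 1, 2] := by decide
  have e1 := Int.shiftRight_eq_div_pow (↑a : Int) 1
  have e2 := Int.shiftRight_eq_div_pow ((↑a : Int) >>> (1 : Nat)) 1
  simp at e1 e2
  simp [NtoListB, hr, List.foldl]
  constructor <;> omega

lemma pvGet0 (u v w : Int) : (PySem.List.pyGet? [u, v, w] 0).getD 0 = u := by simp
lemma pvGet1 (u v w : Int) : (PySem.List.pyGet? [u, v, w] 1).getD 0 = v := by
  simp [PySem.List.pyGet?, PySem.List.pyIdx?]
lemma pvGet2 (u v w : Int) : (PySem.List.pyGet? [u, v, w] 2).getD 0 = w := by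
  simp [PySem.List.pyGet?, PySem.List.pyIdx?]
lemma pvSet0 (u v w x : Int) : PySem.List.pySetD [u, v, w] 0 x = [x, v, w] := by
  simp [PySem.List.pySetD, PySem.List.pySet?, PySem.List.pyIdx?]
lemma pvSet1 (u v w x : Int) : PySem.List.pySetD [u, v, w] 1 x = [u, x, w] := by
  simp [PySem.List.pySetD, PySem.List.pySet?, PySem.List.pyIdx?]
lemma pvSet2 (u v w x : Int) : PySem.List.pySetD [u, v, w] 2 x = [u, v, x] := by
  simp [PySem.List.pySetD, PySem.List.pySet?, PySem.List.pyIdx?]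

lemma pvBitStep (a b e j : Nat) :
    (e ||| (a ^^^ b)) / 2 ^ j % 2 = if b / 2 ^ j % 2 ≠ a / 2 ^ j % 2 then 1 else e / 2 ^ j % 2 := by
  have key : ∀ x : Nat, x / 2 ^ j % 2 = (x.testBit j).toNat := by
    intro x
    rw [Nat.testBit_eq_decide_div_mod_eq]
    rcases Nat.mod_two_eq_zero_or_one (x / 2 ^ j) with h | h <;> simp [h]
  rw [key, key, key, key, Nat.testBit_or, Nat.testBit_xor]
  cases a.testBit j <;> cases b.testBit j <;> cases e.testBit j <;> simp

-- one step of A's inner comparison loop = one OR-of-XOR step on the bit vector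
lemma pvAinnerStep (a b e : Nat) :
    (PySem.List.pyRange 0 3 1).foldl
      (fun (maskl : List Int) (j : Int) =>
        if ¬ ((PySem.List.pyGet? (NtoListB (↑b) 3) j).getD 0
               = (PySem.List.pyGet? (NtoListB (↑a) 3) j).getD 0)
        then PySem.List.pySetD maskl j 1 else maskl)
      (pvBits3 e)
    = pvBits3 (e ||| (a ^^^ b)) := by
  have hr : PySem.List.pyRange 0 3 1 = [0, 1, 2] := by decide
  have h0 := pvBitStep a b e 0
  have h1 := pvBitStep a b e 1
  have h2 := pvBitStep a b e 2
  norm_num at h0 h1 h2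
  rw [hr, pvNtoListB_natCast, pvNtoListB_natCast]
  simp only [List.foldl_cons, List.foldl_nil, pvBits3, pvGet0, pvGet1, pvGet2, Nat.cast_inj]
  rw [h0, h1, h2]
  by_cases c0 : b % 2 = a % 2 <;> by_cases c1 : b / 2 % 2 = a / 2 % 2 <;>
    by_cases c2 : b / 4 % 2 = a / 4 % 2 <;>
    simp only [c0, c1, c2, not_true, not_false_iff, if_true, if_false, ite_true, ite_false,
      pvSet0, pvSet1, pvSet2, Nat.cast_one]

-- fold over index range = fold over the tail elements (A's 'for i in range(1, len(ff))')
lemma pvFoldIdx {β : Type} (g : β → Int → β) :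
    ∀ (t pre : List Int) (s0 : β),
      (PySem.List.pyRange (pre.length : Int) ((pre ++ t).length : Int) 1).foldl
        (fun s i => g s ((PySem.List.pyGet? (pre ++ t) i).getD 0)) s0
      = t.foldl g s0 := by
  intro t
  induction t with
  | nil =>
    intro pre s0
    simp [PySem.List.pyRange_one_eq_nil]
  | cons x t ih =>
    intro pre s0
    have hlen : ((pre.length : Int)) < ((pre ++ x :: t).length : Int) := by
      simp
    rw [PySem.List.pyRange_one_cons hlen]
    simp only [List.foldl_cons]
    rw [PySem.List.pyGet?_append_length]
    have := ih (pre ++ [x]) (g s0 x)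
    simp only [List.append_assoc, List.singleton_append, List.length_append,
      List.length_cons, List.length_nil] at this ⊢
    have harith : ((pre.length : Int)) + 1 = ((pre.length + 1 : Nat) : Int) := by push_cast; ring
    simp only [Option.getD_some]
    rw [harith]
    convert this using 3

-- B's fold keeps the first position and accumulates the OR of XORs
lemma pvFoldKeep (t : List Int) : ∀ (h d : Int), 0 ≤ h →
    t.foldl pvStep (h, d)
      = (h, t.foldl (fun d x => PySem.Int.bor d (PySem.Int.bxor x h)) d) := by
  induction t with
  | nil => intro h d _; rfl
  | cons x t ih =>
    intro h d hh
    simp only [List.foldl_cons, pvStep]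
    have : ¬ h < 0 := by omega
    simp [this, ih _ _ hh]

-- the Int diff-fold is the cast of the corresponding Nat fold
def pvNatD (t : List Int) (b e : Nat) : Nat := t.foldl (fun d x => d ||| (x.toNat ^^^ b)) e

lemma pvDiffCast (t : List Int) : ∀ (b e : Nat), (∀ x ∈ t, 0 ≤ x) →
    t.foldl (fun d x => PySem.Int.bor d (PySem.Int.bxor x (↑b))) (↑e : Int) = ↑(pvNatD t b e) := by
  induction t with
  | nil => intro b e _; rfl
  | cons x t ih =>
    intro b e ht
    have hx : x = ↑x.toNat := by
      have := ht x (by simp); omega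
    simp only [List.foldl_cons, pvNatD]
    rw [hx, PySem.Int.bxor_natCast, PySem.Int.bor_natCast]
    exact ih b _ (fun y hy => ht y (by simp [hy]))

-- A's outer loop maintains the three low bits of B's diff accumulator
lemma pvFoldA (b : Nat) (t : List Int) : ∀ (e : Nat), (∀ x ∈ t, 0 ≤ x) →
    t.foldl
      (fun (maskl : List Int) (x : Int) =>
        (PySem.List.pyRange 0 3 1).foldl
          (fun (maskl : List Int) (j : Int) =>
            if ¬ ((PySem.List.pyGet? (NtoListB (↑b) 3) j).getD 0
                   = (PySem.List.pyGet? (NtoListB x 3) j).getD 0)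
            then PySem.List.pySetD maskl j 1 else maskl)
          maskl)
      (pvBits3 e)
    = pvBits3 (pvNatD t b e) := by
  induction t with
  | nil => intro e _; rfl
  | cons x t ih =>
    intro e ht
    have hx : x = ↑x.toNat := by
      have := ht x (by simp); omega
    simp only [List.foldl_cons, pvNatD]
    rw [hx, pvAinnerStep x.toNat b e]
    exact ih _ (fun y hy => ht y (by simp [hy]))

-- the two string builders agree whenever the three relevant mask bits agree
set_option maxHeartbeats 800000 in
lemma pvBuildGen (f m v : Int)
    (h0 : PySem.Int.mod m 2 = PySem.Int.mod v 2)
    (h1 : PySem.Int.mod (m >>> (1 : Nat)) 2 = PySem.Int.mod (v >>> (1 : Nat)) 2)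
    (h2 : PySem.Int.mod ((m >>> (1 : Nat)) >>> (1 : Nat)) 2
            = PySem.Int.mod ((v >>> (1 : Nat)) >>> (1 : Nat)) 2) :
    DStrIMask f m
    = String.ofList (PySem.Chars.join " \\cdot ".toList
      (((PySem.List.pyRange 0 3 1).foldl
        (fun (s : List (List Char) × Int × Int) (ii : Int) =>
          let parts := if PySem.Int.mod s.2.1 2 = 0 then
              s.1 ++ [if PySem.Int.mod s.2.2 2 ≠ 0 then (PySem.List.pyGet? pvLettB ii).getD []
                      else "\\overline{".toList ++ (PySem.List.pyGet? pvLettB ii).getD [] ++ "}".toList]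
            else s.1
          (parts, s.2.1 >>> (1 : Nat), s.2.2 >>> (1 : Nat)))
        (([] : List (List Char)), v, f)).1)) := by
  have hr : PySem.List.pyRange 0 3 1 = [0, 1, 2] := by decide
  rw [DStrIMask, hr]
  simp only [List.foldl_cons, List.foldl_nil]
  rw [h0]
  by_cases d0 : PySem.Int.mod v 2 = 0 <;>
    simp only [d0, if_true, if_false, ite_true, ite_false, eq_self_iff_true,
      not_true_eq_false, not_false_eq_true] <;>
  rw [h1] <;>
  (by_cases d1 : PySem.Int.mod (v >>> (1 : Nat)) 2 = 0 <;>
    simp only [d1, if_true, if_false, ite_true, ite_false, eq_self_iff_true,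
      not_true_eq_false, not_false_eq_true]) <;>
  rw [h2] <;>
  (by_cases d2 : PySem.Int.mod ((v >>> (1 : Nat)) >>> (1 : Nat)) 2 = 0 <;>
    simp only [d2, if_true, if_false, ite_true, ite_false, eq_self_iff_true,
      not_true_eq_false, not_false_eq_true]) <;>
  simp [PySem.Chars.join, pvLett, pvLettB, PySem.List.pyGet?, PySem.List.pyIdx?,
    List.intercalate, List.intersperse, List.flatten, List.append_assoc]

lemma pvModCast (x : Nat) : PySem.Int.mod (↑x : Int) 2 = ↑(x % 2) := by
  rw [PySem.Int.mod_eq_emod_of_pos (by norm_num)]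
  omega

-- A's outer comparison loop, as a standalone term (proof helper)
def pvMaskA (h : Int) (t : List Int) : List Int :=
  (PySem.List.pyRange 1 (((h :: t).length : Nat) : Int) 1).foldl
    (fun (maskl : List Int) (i : Int) =>
      (PySem.List.pyRange 0 3 1).foldl
        (fun (maskl : List Int) (j : Int) =>
          if ¬ ((PySem.List.pyGet? (NtoListB h 3) j).getD 0
                 = (PySem.List.pyGet? (NtoListB ((PySem.List.pyGet? (h :: t) i).getD 0) 3) j).getD 0)
          then PySem.List.pySetD maskl j 1 else maskl)
        maskl)
    ([0, 0, 0] : List Int)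

lemma pvMaskA_eq (h : Int) (t : List Int) (hh : 0 ≤ h) (hts : ∀ x ∈ t, 0 ≤ x) :
    pvMaskA h t = pvBits3 (pvNatD t h.toNat 0) := by
  have hb : h = ↑h.toNat := by omega
  have hfold := pvFoldIdx
    (fun (maskl : List Int) (x : Int) =>
      (PySem.List.pyRange 0 3 1).foldl
        (fun (maskl : List Int) (j : Int) =>
          if ¬ ((PySem.List.pyGet? (NtoListB h 3) j).getD 0
                 = (PySem.List.pyGet? (NtoListB x 3) j).getD 0)
          then PySem.List.pySetD maskl j 1 else maskl)
        maskl)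
    t [h] ([0, 0, 0] : List Int)
  simp only [List.singleton_append, List.length_singleton] at hfold
  have step1 : pvMaskA h t
      = t.foldl
          (fun (maskl : List Int) (x : Int) =>
            (PySem.List.pyRange 0 3 1).foldl
              (fun (maskl : List Int) (j : Int) =>
                if ¬ ((PySem.List.pyGet? (NtoListB h 3) j).getD 0
                       = (PySem.List.pyGet? (NtoListB x 3) j).getD 0)
                then PySem.List.pySetD maskl j 1 else maskl)
              maskl)
          ([0, 0, 0] : List Int) := hfold
  rw [step1]
  have hbits0 : ([0, 0, 0] : List Int) = pvBits3 0 := by simp [pvBits3]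
  rw [hbits0]
  conv_lhs => rw [hb]
  exact pvFoldA h.toNat t 0 hts

-- the else-branches of the two programs agree
lemma pvPosCase (h : Int) (t : List Int) (hh : 0 ≤ h) (hts : ∀ x ∈ t, 0 ≤ x) :
    DStrIMask h
      ((PySem.List.pyGet? (pvMaskA h t) 0).getD 0
        + (PySem.List.pyGet? (pvMaskA h t) 1).getD 0 * 2
        + (PySem.List.pyGet? (pvMaskA h t) 2).getD 0 * 4)
    = String.ofList (PySem.Chars.join " \\cdot ".toList
      (((PySem.List.pyRange 0 3 1).foldl
        (fun (s : List (List Char) × Int × Int) (ii : Int) =>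
          let parts := if PySem.Int.mod s.2.1 2 = 0 then
              s.1 ++ [if PySem.Int.mod s.2.2 2 ≠ 0 then (PySem.List.pyGet? pvLettB ii).getD []
                      else "\\overline{".toList ++ (PySem.List.pyGet? pvLettB ii).getD [] ++ "}".toList]
            else s.1
          (parts, s.2.1 >>> (1 : Nat), s.2.2 >>> (1 : Nat)))
        (([] : List (List Char)), (↑(pvNatD t h.toNat 0) : Int), h)).1)) := by
  set dN := pvNatD t h.toNat 0 with hdN
  rw [pvMaskA_eq h t hh hts, ← hdN]
  simp only [pvBits3, pvGet0, pvGet1, pvGet2]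
  apply pvBuildGen
  · have hM : ((↑(dN % 2) + ↑(dN / 2 % 2) * 2 + ↑(dN / 4 % 2) * 4 : Int)) = ↑(dN % 8) := by
      push_cast; omega
    rw [hM, pvModCast, pvModCast]
    norm_cast
    omega
  · have hM : ((↑(dN % 2) + ↑(dN / 2 % 2) * 2 + ↑(dN / 4 % 2) * 4 : Int)) = ↑(dN % 8) := by
      push_cast; omega
    rw [hM, ← Int.natCast_shiftRight, ← Int.natCast_shiftRight, pvModCast, pvModCast]
    norm_cast
    simp [Nat.shiftRight_one]
    omega
  · have hM : ((↑(dN % 2) + ↑(dN / 2 % 2) * 2 + ↑(dN / 4 % 2) * 4 : Int)) = ↑(dN % 8) := by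
      push_cast; omega
    rw [hM, ← Int.natCast_shiftRight, ← Int.natCast_shiftRight, ← Int.natCast_shiftRight,
        ← Int.natCast_shiftRight, pvModCast, pvModCast]
    norm_cast
    simp [Nat.shiftRight_one]
    omega

theorem pvMain (n : Int) : DStrFrom1fN n = DStrFrom1fN_alt n := by
  by_cases hn : 0 < n
  · -- n has at least one set bit
    obtain ⟨h, t, hft⟩ : ∃ h t, pvNtoListGo n 0 = h :: t := by
      rcases hgo : pvNtoListGo n 0 with _ | ⟨h, t⟩
      · exact absurd hgo (pvNtoListGo_ne_nil n 0 hn)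
      · exact ⟨h, t, rfl⟩
    have hh : 0 ≤ h := pvNtoListGo_nonneg n 0 h (by rw [hft]; simp)
    have hts : ∀ x ∈ t, 0 ≤ x := fun x hx => pvNtoListGo_nonneg n 0 x (by rw [hft]; simp [hx])
    have hb : h = ↑h.toNat := by omega
    -- B's scan
    have hscan : pvScan n 0 (-1) 0 = (h, ↑(pvNatD t h.toNat 0)) := by
      rw [pvScan_eq_foldl, hft]
      simp only [List.foldl_cons, pvStep]
      have : (-1 : Int) < 0 := by norm_num
      simp only [this, if_true, ite_true]
      rw [show PySem.Int.bor 0 (PySem.Int.bxor h h) = (0 : Int) by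
            rw [PySem.Int.bxor_self]; decide]
      rw [pvFoldKeep t h 0 hh]
      congr 1
      rw [show (0 : Int) = ((0 : Nat) : Int) by norm_num]
      conv_lhs => rw [hb]
      exact pvDiffCast t h.toNat 0 hts
    have hlen : ¬ ((h :: t).length = 0) := by simp
    have hnl : ¬ ((h, (↑(pvNatD t h.toNat 0) : Int)).1 < 0) := by simp; omega
    simp only [DStrFrom1fN, DStrFrom1fN_alt, NtoList, hft, hscan,
      PySem.List.pyGet?_zero_cons, Option.getD_some, if_neg hlen, if_neg hnl]
    exact pvPosCase h t hh hts
  · -- no set bit: both sides return emptyset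
    have hff : pvNtoListGo n 0 = [] := pvNtoListGo_nil n 0 hn
    rw [DStrFrom1fN, DStrFrom1fN_alt]
    simp [NtoList, hff, pvScan_nil n hn]

-- ===== VERDICT (by name: the statement is the Claim_ definition above) =====
theorem DStrFrom1fN_spec : Claim_equal_DStrFrom1fN := by
  intro n _
  exact pvMain n
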